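-- pv_equiv track=rewrite | github.com/redmage123/artemis | src/java_framework/analyzer/technology_detector.py | detect_databases
-- ===== SOURCE A (Python) =====
-- from typing import Dict, List, Optional, Tuple
--
-- def detect_databases(dependencies: Dict[str, str]) -> List[str]:
--     """
--     WHY: Identifies database drivers
--     RESPONSIBILITY: Checks for database driver dependencies
--
--     Args:
--         dependencies: Project dependencies
--
--     Returns:
--         List of databases
--     """
--     dbs = []
--
--     # Dispatch table for database detection
--     db_checks: Dict[str, str] = {
--         "postgresql": "PostgreSQL",
--         "mysql": "MySQL",
--         "mariadb": "MariaDB",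
--         "h2": "H2",
--         "hsqldb": "HSQLDB",
--         "oracle": "Oracle",
--         "mongodb": "MongoDB",
--         "redis": "Redis",
--     }
--
--     # Handle SQL Server special cases
--     for dep in dependencies:
--         if "sqlserver" in dep or "mssql" in dep:
--             if "SQL Server" not in dbs:
--                 dbs.append("SQL Server")
--
--     for keyword, db_name in db_checks.items():
--         if any(keyword in dep for dep in dependencies):
--             dbs.append(db_name)
--
--     return dbs
-- ===== SOURCE B (Python) =====
-- def detect_databases(dependencies):
--     """Single pass: build a set of found databases, then emit in fixed order."""
--     db_checks = [
--         ("postgresql", "PostgreSQL"),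
--         ("mysql", "MySQL"),
--         ("mariadb", "MariaDB"),
--         ("h2", "H2"),
--         ("hsqldb", "HSQLDB"),
--         ("oracle", "Oracle"),
--         ("mongodb", "MongoDB"),
--         ("redis", "Redis"),
--     ]
--     found = set()
--     for dep in dependencies:
--         if "sqlserver" in dep or "mssql" in dep:
--             found.add("SQL Server")
--         for keyword, db_name in db_checks:
--             if keyword in dep:
--                 found.add(db_name)
--     result = ["SQL Server"] if "SQL Server" in found else []
--     result += [db_name for _, db_name in db_checks if db_name in found]
--     return result
-- ===== Notes on version B (the rewrite author's own statement) =====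
-- stated objective: alternative
-- what changed: Replaces the SQL-Server dedup loop plus eight separate any-scans over the dependencies with one single pass over the dependencies that accumulates found databases in a set, followed by one ordered emission pass over the check table.
import Mathlib
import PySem

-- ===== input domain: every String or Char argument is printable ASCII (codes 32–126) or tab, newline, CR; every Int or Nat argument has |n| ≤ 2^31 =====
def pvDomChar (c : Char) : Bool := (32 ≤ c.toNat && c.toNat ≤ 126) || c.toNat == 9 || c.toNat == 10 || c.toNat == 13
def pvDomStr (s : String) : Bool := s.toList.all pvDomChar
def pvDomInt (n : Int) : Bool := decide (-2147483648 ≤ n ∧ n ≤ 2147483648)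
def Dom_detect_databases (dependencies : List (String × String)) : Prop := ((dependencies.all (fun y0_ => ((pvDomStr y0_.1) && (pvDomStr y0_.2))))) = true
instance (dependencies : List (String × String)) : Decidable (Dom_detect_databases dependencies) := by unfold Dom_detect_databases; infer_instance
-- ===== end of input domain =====

-- B changes the traversal (one pass over the dependencies into a set, then one ordered emission pass) instead of A's nine scans; equivalence of the return values is proved below.

-- ===== PORT A =====
-- db_checks dispatch table of A (iterating a dict yields its keys in insertion order)
def dbChecksA : List (String × String) :=
  [("postgresql", "PostgreSQL"), ("mysql", "MySQL"), ("mariadb", "MariaDB"),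
   ("h2", "H2"), ("hsqldb", "HSQLDB"), ("oracle", "Oracle"),
   ("mongodb", "MongoDB"), ("redis", "Redis")]

def detect_databases (dependencies : List (String × String)) : List String :=
  -- first loop: SQL Server special cases ('for dep in dependencies' iterates the keys)
  let dbs : List String := dependencies.foldl (fun dbs dep =>
    if PySem.Str.isIn "sqlserver" dep.1 || PySem.Str.isIn "mssql" dep.1 then
      if !(dbs.contains "SQL Server") then dbs ++ ["SQL Server"] else dbs
    else dbs) []
  -- second loop: one any-scan per keyword
  dbChecksA.foldl (fun dbs p =>
    if dependencies.any (fun dep => PySem.Str.isIn p.1 dep.1) then dbs ++ [p.2] else dbs) dbs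

-- ===== PORT B =====
def dbChecksB : List (String × String) :=
  [("postgresql", "PostgreSQL"), ("mysql", "MySQL"), ("mariadb", "MariaDB"),
   ("h2", "H2"), ("hsqldb", "HSQLDB"), ("oracle", "Oracle"),
   ("mongodb", "MongoDB"), ("redis", "Redis")]

-- body of B's single loop over the dependencies
def passDep (found : PySem.Set String) (dep : String × String) : PySem.Set String :=
  let found := if PySem.Str.isIn "sqlserver" dep.1 || PySem.Str.isIn "mssql" dep.1 then
      PySem.Set.add found "SQL Server" else found
  dbChecksB.foldl (fun found p =>
    if PySem.Str.isIn p.1 dep.1 then PySem.Set.add found p.2 else found) found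

def detect_databases_alt (dependencies : List (String × String)) : List String :=
  let found : PySem.Set String := dependencies.foldl passDep PySem.Set.empty
  (if PySem.Set.contains found "SQL Server" then ["SQL Server"] else []) ++
    (dbChecksB.filter (fun p => PySem.Set.contains found p.2)).map Prod.snd

-- ===== PRECONDITION & SPEC =====
def Spec_detect_databases (dependencies : List (String × String)) (out : List String) : Prop := out = detect_databases_alt dependencies
instance (dependencies : List (String × String)) (out : List String) : Decidable (Spec_detect_databases dependencies out) := by unfold Spec_detect_databases; infer_instance

-- ===== CLAIM (what is proved, stated in full; the proofs are below) =====
def Claim_equal_detect_databases : Prop := ∀ (dependencies : List (String × String)), Dom_detect_databases dependencies → Spec_detect_databases dependencies (detect_databases dependencies)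

-- ===== LEMMAS AND PROOFS =====

theorem set_contains_add (s : PySem.Set String) (y x : String) :
    PySem.Set.contains (PySem.Set.add s y) x = (PySem.Set.contains s x || x == y) := by
  apply Bool.eq_iff_iff.mpr
  simp [PySem.Set.mem_add, beq_iff_eq]

-- membership after the inner (per-dep) fold over the check table
theorem contains_inner (checks : List (String × String)) (dep : String × String)
    (found : PySem.Set String) (x : String) :
    PySem.Set.contains (checks.foldl (fun found p =>
        if PySem.Str.isIn p.1 dep.1 then PySem.Set.add found p.2 else found) found) x
      = (PySem.Set.contains found x
          || checks.any (fun p => x == p.2 && PySem.Str.isIn p.1 dep.1)) := by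
  induction checks generalizing found with
  | nil => simp
  | cons p rest ih =>
    simp only [List.foldl_cons, List.any_cons]
    by_cases h : PySem.Str.isIn p.1 dep.1 = true
    · rw [if_pos h, ih, set_contains_add, h]
      simp only [Bool.and_true, Bool.or_assoc]
    · rw [if_neg h, ih]
      rw [Bool.not_eq_true] at h
      rw [h]
      simp

-- the databases a single dependency key triggers
def trigB (x : String) (dep : String × String) : Bool :=
  (x == "SQL Server" && (PySem.Str.isIn "sqlserver" dep.1 || PySem.Str.isIn "mssql" dep.1))
    || dbChecksB.any (fun p => x == p.2 && PySem.Str.isIn p.1 dep.1)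

theorem contains_passDep (found : PySem.Set String) (dep : String × String) (x : String) :
    PySem.Set.contains (passDep found dep) x
      = (PySem.Set.contains found x || trigB x dep) := by
  simp only [passDep, trigB, contains_inner]
  by_cases h : (PySem.Str.isIn "sqlserver" dep.1 || PySem.Str.isIn "mssql" dep.1) = true
  · rw [if_pos h, set_contains_add, h]
    simp only [Bool.and_true, Bool.or_assoc]
  · rw [if_neg h]
    rw [Bool.not_eq_true] at h
    rw [h]
    simp

-- membership after the single pass over the dependencies
theorem contains_pass (deps : List (String × String)) (found : PySem.Set String) (x : String) :
    PySem.Set.contains (deps.foldl passDep found) x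
      = (PySem.Set.contains found x || deps.any (trigB x)) := by
  induction deps generalizing found with
  | nil => simp
  | cons dep rest ih =>
    rw [List.foldl_cons, ih, contains_passDep, List.any_cons, Bool.or_assoc]

-- A's first loop keeps ["SQL Server"] once it is there
theorem firstA_mem (deps : List (String × String)) :
    deps.foldl (fun dbs dep =>
      if PySem.Str.isIn "sqlserver" dep.1 || PySem.Str.isIn "mssql" dep.1 then
        if !(dbs.contains "SQL Server") then dbs ++ ["SQL Server"] else dbs
      else dbs) ["SQL Server"] = ["SQL Server"] := by
  induction deps with
  | nil => rfl
  | cons dep rest ih =>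
    simp only [List.foldl_cons]
    by_cases h : (PySem.Str.isIn "sqlserver" dep.1 || PySem.Str.isIn "mssql" dep.1) = true
    · rw [if_pos h]
      simpa using ih
    · rw [if_neg h]
      exact ih

-- A's first loop = the one-element conditional list
theorem firstA (deps : List (String × String)) :
    deps.foldl (fun dbs dep =>
      if PySem.Str.isIn "sqlserver" dep.1 || PySem.Str.isIn "mssql" dep.1 then
        if !(dbs.contains "SQL Server") then dbs ++ ["SQL Server"] else dbs
      else dbs) []
      = (if deps.any (fun dep => PySem.Str.isIn "sqlserver" dep.1 || PySem.Str.isIn "mssql" dep.1)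
         then ["SQL Server"] else []) := by
  induction deps with
  | nil => rfl
  | cons dep rest ih =>
    simp only [List.foldl_cons, List.any_cons]
    by_cases h : (PySem.Str.isIn "sqlserver" dep.1 || PySem.Str.isIn "mssql" dep.1) = true
    · rw [if_pos h]
      simp only [h, Bool.true_or, if_true]
      simpa using firstA_mem rest
    · rw [if_neg h]
      simp only [Bool.not_eq_true] at h
      simp only [h, Bool.false_or]
      exact ih

-- for "SQL Server", trigB is exactly A's special-case test
theorem trigB_sqlserver :
    trigB "SQL Server"
      = fun dep => PySem.Str.isIn "sqlserver" dep.1 || PySem.Str.isIn "mssql" dep.1 := by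
  funext dep
  simp [trigB, dbChecksB]

-- for each table entry, trigB of its db name is exactly the keyword test
theorem trigB_entry (p : String × String) (hp : p ∈ dbChecksB) :
    ∀ dep, trigB p.2 dep = PySem.Str.isIn p.1 dep.1 := by
  fin_cases hp <;> intro dep <;> simp [trigB, dbChecksB]

-- ===== VERDICT (by name: the statement is the Claim_ definition above) =====
theorem detect_databases_spec : Claim_equal_detect_databases := by
  intro deps _
  show detect_databases deps = detect_databases_alt deps
  unfold detect_databases detect_databases_alt
  simp only [firstA,
    PySem.List.foldl_append_if (l := dbChecksA)
      (p := fun p => deps.any (fun dep => PySem.Str.isIn p.1 dep.1)) (f := Prod.snd),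
    contains_pass]
  simp only [PySem.Set.empty, PySem.Set.contains, List.contains_nil, Bool.false_or]
  have hA : dbChecksA = dbChecksB := rfl
  rw [hA, trigB_sqlserver,
    List.filter_congr (l := dbChecksB)
      (p := fun p => deps.any fun dep => PySem.Str.isIn p.1 dep.1)
      (q := fun p => deps.any (trigB p.2))
      (fun p hp => congrArg deps.any (funext fun dep => (trigB_entry p hp dep).symm))]
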